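-- pv_equiv track=rewrite | github.com/jdecker76/fast-agent | src/fast_agent/tools/apply_patch_tool.py | normalize_tool_name
-- ===== SOURCE A (Python) =====
-- def normalize_tool_name(tool_name: str | None) -> str:
--     if not tool_name:
--         return ""
--     normalized = tool_name.lower()
--     for sep in ("/", ".", ":"):
--         if sep in normalized:
--             normalized = normalized.rsplit(sep, 1)[-1]
--     return normalized
-- ===== SOURCE B (Python) =====
-- def normalize_tool_name(tool_name: str | None) -> str:
--     if not tool_name:
--         return ""
--     out = []
--     for c in reversed(tool_name.lower()):
--         if c in "/.:":
--             break
--         out.append(c)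
--     return "".join(reversed(out))
-- ===== Notes on version B (the rewrite author's own statement) =====
-- stated objective: simpler
-- what changed: Replaces the three sequential rsplit passes (one per separator) by a single backward scan that collects characters until the first separator of any kind, i.e. the suffix after the rightmost separator.
import Mathlib
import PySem

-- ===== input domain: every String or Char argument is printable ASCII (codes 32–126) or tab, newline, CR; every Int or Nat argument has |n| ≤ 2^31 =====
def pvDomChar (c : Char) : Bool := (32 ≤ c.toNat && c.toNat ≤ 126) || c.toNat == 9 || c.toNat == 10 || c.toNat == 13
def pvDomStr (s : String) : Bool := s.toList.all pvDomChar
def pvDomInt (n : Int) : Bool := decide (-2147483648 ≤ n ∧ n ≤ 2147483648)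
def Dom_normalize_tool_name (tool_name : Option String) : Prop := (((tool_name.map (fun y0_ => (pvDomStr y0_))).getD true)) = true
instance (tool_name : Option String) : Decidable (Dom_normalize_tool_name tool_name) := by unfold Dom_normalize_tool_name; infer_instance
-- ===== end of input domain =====

-- B replaces A's three sequential rsplit passes by a single backward scan up to the
-- first separator of any kind (objective: simpler).

-- ===== PORT A =====
-- exact: `normalized.rsplit(sep, 1)[-1]` is the segment after the LAST occurrence of the
-- single-character sep (the whole string if sep is absent); the foldl resets its
-- accumulator at each occurrence of sep, leaving exactly that last segment.
def pvRsplitLast (sep : Char) (l : List Char) : List Char :=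
  l.foldl (fun acc c => if c = sep then [] else acc ++ [c]) []

def pvStepA (l : List Char) (sep : Char) : List Char :=
  if sep ∈ l then pvRsplitLast sep l else l

def normalize_tool_name (tool_name : Option String) : String :=
  match tool_name with
  | none => ""
  | some s =>
    if s = "" then ""
    else String.ofList (['/', '.', ':'].foldl pvStepA (PySem.Chars.lower s.toList))

-- ===== PORT B =====
-- the `for c in reversed(...): if c in "/.:" : break; out.append(c)` loop collects the
-- reversed suffix up to the first separator = takeWhile on the reversed list.
def normalize_tool_name_alt (tool_name : Option String) : String :=
  match tool_name with
  | none => ""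
  | some s =>
    if s = "" then ""
    else
      String.ofList
        (((PySem.Chars.lower s.toList).reverse.takeWhile
            (fun c => !(c == '/' || c == '.' || c == ':'))).reverse)

-- ===== PRECONDITION & SPEC =====
def Spec_normalize_tool_name (tool_name : Option String) (out : String) : Prop := out = normalize_tool_name_alt tool_name
instance (tool_name : Option String) (out : String) : Decidable (Spec_normalize_tool_name tool_name out) := by unfold Spec_normalize_tool_name; infer_instance

-- ===== CLAIM (what is proved, stated in full; the proofs are below) =====
def Claim_equal_normalize_tool_name : Prop := ∀ (tool_name : Option String), Dom_normalize_tool_name tool_name → Spec_normalize_tool_name tool_name (normalize_tool_name tool_name)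

-- ===== LEMMAS AND PROOFS =====

-- takeWhile (· != sep) keeps the whole list exactly when sep is absent
lemma pvTW_all (sep : Char) (l : List Char) (h : sep ∉ l) :
    l.takeWhile (fun x => x != sep) = l := by
  rw [List.takeWhile_eq_self_iff]
  intro x hx
  simp only [bne_iff_ne, ne_eq]
  exact fun he => h (he ▸ hx)

-- ... and is strictly shorter when sep occurs
lemma pvTW_len_ne (sep : Char) (l : List Char) (h : sep ∈ l) :
    (l.takeWhile (fun x => x != sep)).length ≠ l.length := by
  intro hlen
  have heq := (List.takeWhile_prefix (l := l) (p := fun x => x != sep)).eq_of_length hlen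
  have := (List.takeWhile_eq_self_iff (p := fun x => x != sep) (l := l)).mp heq sep h
  simp at this

-- the accumulator-resetting foldl computes the suffix after the last occurrence of sep
lemma pvRsplitLast_fold (sep : Char) (l : List Char) : ∀ acc : List Char,
    l.foldl (fun acc c => if c = sep then [] else acc ++ [c]) acc =
      if sep ∈ l then (l.reverse.takeWhile (fun c => c != sep)).reverse else acc ++ l := by
  induction l with
  | nil => simp
  | cons c rest ih =>
    intro acc
    simp only [List.foldl_cons, List.reverse_cons, List.takeWhile_append]
    by_cases hc : c = sep
    · subst c
      rw [if_pos rfl, ih, if_pos (List.mem_cons_self ..)]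
      by_cases hr : sep ∈ rest
      · rw [if_pos hr, if_neg (by simpa using pvTW_len_ne sep rest.reverse (by simpa using hr))]
      · rw [if_neg hr, if_pos (by rw [pvTW_all sep rest.reverse (by simpa using hr)])]
        simp
    · rw [if_neg hc, ih]
      by_cases hr : sep ∈ rest
      · rw [if_pos hr, if_pos (List.mem_cons_of_mem _ hr),
          if_neg (by simpa using pvTW_len_ne sep rest.reverse (by simpa using hr))]
      · rw [if_neg hr, if_neg (by simp only [List.mem_cons, not_or]; exact ⟨fun h => hc h.symm, hr⟩)]
        simp

-- one pass of A (membership guard + rsplit) = take the suffix after the last sep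
lemma pvStepA_eq (sep : Char) (l : List Char) :
    pvStepA l sep = (l.reverse.takeWhile (fun c => c != sep)).reverse := by
  unfold pvStepA pvRsplitLast
  by_cases h : sep ∈ l
  · rw [if_pos h, pvRsplitLast_fold, if_pos h]
  · rw [if_neg h, pvTW_all sep l.reverse (by simpa using h)]
    simp

-- the three sequential passes collapse to one takeWhile over the combined predicate
lemma pvFold_eq (l : List Char) :
    ['/', '.', ':'].foldl pvStepA l =
      (l.reverse.takeWhile (fun c => !(c == '/' || c == '.' || c == ':'))).reverse := by
  simp only [List.foldl_cons, List.foldl_nil, pvStepA_eq, List.reverse_reverse,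
    List.takeWhile_takeWhile]
  congr 1
  have hp : (fun c : Char => decide ((c != ':') = true ∧ decide ((c != '.') = true ∧ (c != '/') = true) = true))
      = (fun c : Char => !(c == '/' || c == '.' || c == ':')) := by
    funext c
    by_cases h1 : c = '/' <;> by_cases h2 : c = '.' <;> by_cases h3 : c = ':' <;>
      simp [h1, h2, h3]
  rw [hp]

-- ===== VERDICT (by name: the statement is the Claim_ definition above) =====
theorem normalize_tool_name_spec : Claim_equal_normalize_tool_name := by
  intro tool_name _
  unfold Spec_normalize_tool_name normalize_tool_name normalize_tool_name_alt
  match tool_name with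
  | none => rfl
  | some s =>
    by_cases hs : s = ""
    · simp [hs]
    · simp only [if_neg hs]
      rw [pvFold_eq]
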